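-- pv_equiv track=rewrite | github.com/Hassan220022/g2scv_hack | services/cv_ocr_parser/document_parser.py | _extract_cv_sections
-- ===== SOURCE A (Python) =====
-- from typing import Dict, List, Any, Optional, Set, Tuple
--
-- CV_SECTIONS = [
--     'education', 'experience', 'work experience', 'employment', 'skills',
--     'technical skills', 'projects', 'certifications', 'achievements',
--     'languages', 'summary', 'objective', 'professional summary', 'profile',
--     'publications', 'references', 'volunteer', 'interests', 'awards'
-- ]
--
-- def _extract_cv_sections(text: str) -> Dict[str, str]:
--     """Attempt to extract common CV sections based on headings."""
--     sections = {}
--     lines = text.split('\n')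
--     current_section = None
--     section_content = []
--
--     for line in lines:
--         line = line.strip()
--         if not line:
--             continue
--
--         # Check if this line looks like a section heading
--         is_heading = False
--         line_lower = line.lower()
--
--         for section_name in CV_SECTIONS:
--             if section_name in line_lower and len(line) < 50:  # Avoid matching long lines
--                 # Found a new section
--                 if current_section:
--                     sections[current_section] = '\n'.join(section_content)
--                 current_section = line
--                 section_content = []
--                 is_heading = True
--                 break
--
--         if not is_heading and current_section:
--             section_content.append(line)
--
--     # Add the last section
--     if current_section:
--         sections[current_section] = '\n'.join(section_content)
--
--     return sections
-- ===== SOURCE B (Python) =====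
-- CV_SECTIONS = [
--     'education', 'experience', 'work experience', 'employment', 'skills',
--     'technical skills', 'projects', 'certifications', 'achievements',
--     'languages', 'summary', 'objective', 'professional summary', 'profile',
--     'publications', 'references', 'volunteer', 'interests', 'awards'
-- ]
--
--
-- def _is_heading(line):
--     return len(line) < 50 and any(s in line.lower() for s in CV_SECTIONS)
--
--
-- def _extract_cv_sections(text):
--     # normalize first: the non-empty stripped lines
--     lines = [s for s in (raw.strip() for raw in text.split('\n')) if s]
--     # discard everything before the first heading
--     while lines and not _is_heading(lines[0]):
--         lines = lines[1:]
--     # split the remainder into (heading, body-chunk) runs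
--     sections = {}
--     while lines:
--         head, rest = lines[0], lines[1:]
--         body = []
--         while rest and not _is_heading(rest[0]):
--             body.append(rest[0])
--             rest = rest[1:]
--         sections[head] = '\n'.join(body)
--         lines = rest
--     return sections
-- ===== Notes on version B (the rewrite author's own statement) =====
-- stated objective: alternative
-- what changed: Replaces A's single pass with a running current_section/section_content accumulator by a normalize-then-split decomposition: first build the stripped non-empty lines, drop the pre-heading prefix, then repeatedly span off one heading's body chunk and assign it.
import Mathlib
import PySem

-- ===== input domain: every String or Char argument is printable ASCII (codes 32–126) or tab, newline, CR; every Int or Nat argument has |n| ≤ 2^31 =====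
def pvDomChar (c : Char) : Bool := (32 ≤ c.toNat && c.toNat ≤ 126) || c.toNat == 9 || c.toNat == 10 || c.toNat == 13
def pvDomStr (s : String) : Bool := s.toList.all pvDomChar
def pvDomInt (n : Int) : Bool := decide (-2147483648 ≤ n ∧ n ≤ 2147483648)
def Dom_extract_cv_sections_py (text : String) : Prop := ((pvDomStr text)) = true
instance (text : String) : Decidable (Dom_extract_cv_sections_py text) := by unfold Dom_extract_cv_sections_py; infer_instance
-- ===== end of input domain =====

-- B replaces A's running current_section/section_content accumulator loop by a normalize-then-split
-- decomposition (drop the pre-heading prefix, then repeatedly span off one heading's chunk); objective: alternative.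

-- shared module constant CV_SECTIONS
def cvSections : List String :=
  ["education", "experience", "work experience", "employment", "skills",
   "technical skills", "projects", "certifications", "achievements",
   "languages", "summary", "objective", "professional summary", "profile",
   "publications", "references", "volunteer", "interests", "awards"]

-- ===== PORT A =====
-- A's inner 'for section_name in CV_SECTIONS: … break' loop (the state update on a hit does not
-- depend on section_name, so the helper reports whether some name hit and the caller updates once)
def aIsHeadLoop (line : String) (lineLower : String) : List String → Bool
  | [] => false
  | name :: rest =>
      if PySem.Str.isIn name lineLower && decide (PySem.Str.len line < 50) then true
      else aIsHeadLoop line lineLower rest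

-- A's main 'for line in lines' loop; at the end of input the trailing 'if current_section: …' flush
def aLoop (sections : PySem.Dict String String) (cur : Option String)
    (content : List String) : List String → PySem.Dict String String
  | [] =>
      match cur with
      | some c => sections.insert c (PySem.Str.join "\n" content)
      | none => sections
  | raw :: rest =>
      let line := PySem.Str.strip raw
      if line = "" then aLoop sections cur content rest
      else
        if aIsHeadLoop line (PySem.Str.lower line) cvSections then
          match cur with
          | some c => aLoop (sections.insert c (PySem.Str.join "\n" content)) (some line) [] rest
          | none => aLoop sections (some line) [] rest
        else
          match cur with
          | some _ => aLoop sections cur (content ++ [line]) rest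
          | none => aLoop sections cur content rest

def extract_cv_sections_py (text : String) : List (String × String) :=
  (aLoop PySem.Dict.empty none [] ((PySem.Str.split? text "\n").getD [])).items

-- ===== PORT B =====
def bIsHeading (line : String) : Bool :=
  decide (PySem.Str.len line < 50) &&
    cvSections.any (fun s => PySem.Str.isIn s (PySem.Str.lower line))

-- 'while lines and not _is_heading(lines[0]): lines = lines[1:]'
def bDrop : List String → List String
  | [] => []
  | l :: rest => if bIsHeading l then l :: rest else bDrop rest

-- inner 'while rest and not _is_heading(rest[0]): body.append(rest[0]); rest = rest[1:]'
def bSpan : List String → List String × List String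
  | [] => ([], [])
  | l :: rest =>
      if bIsHeading l then ([], l :: rest)
      else
        let p := bSpan rest
        (l :: p.1, p.2)

theorem bSpan_snd_length_le : ∀ (ls : List String), (bSpan ls).2.length ≤ ls.length := by
  intro ls
  induction ls with
  | nil => simp [bSpan]
  | cons l rest ih =>
      simp only [bSpan]
      split
      · simp
      · simpa using Nat.le_succ_of_le ih

-- outer 'while lines: …' loop
def bBuild (sections : PySem.Dict String String) : List String → PySem.Dict String String
  | [] => sections
  | head :: rest =>
      bBuild (sections.insert head (PySem.Str.join "\n" (bSpan rest).1)) (bSpan rest).2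
  termination_by ls => ls.length
  decreasing_by
    exact Nat.lt_succ_of_le (bSpan_snd_length_le rest)

def extract_cv_sections_py_alt (text : String) : List (String × String) :=
  let lines := (((PySem.Str.split? text "\n").getD []).map PySem.Str.strip).filter (fun s => !(s == ""))
  (bBuild PySem.Dict.empty (bDrop lines)).items

-- ===== PRECONDITION & SPEC =====
def Spec_extract_cv_sections_py (text : String) (out : List (String × String)) : Prop := out = extract_cv_sections_py_alt text
instance (text : String) (out : List (String × String)) : Decidable (Spec_extract_cv_sections_py text out) := by unfold Spec_extract_cv_sections_py; infer_instance

-- ===== CLAIM (what is proved, stated in full; the proofs are below) =====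
def Claim_equal_extract_cv_sections_py : Prop := ∀ (text : String), Dom_extract_cv_sections_py text → Spec_extract_cv_sections_py text (extract_cv_sections_py text)

-- ===== LEMMAS AND PROOFS =====

-- A's heading test equals B's
theorem head_eq (line : String) :
    aIsHeadLoop line (PySem.Str.lower line) cvSections = bIsHeading line := by
  have h : ∀ (names : List String),
      aIsHeadLoop line (PySem.Str.lower line) names =
        (decide (PySem.Str.len line < 50) &&
          names.any (fun s => PySem.Str.isIn s (PySem.Str.lower line))) := by
    intro names
    induction names with
    | nil => simp [aIsHeadLoop]
    | cons n rest ih =>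
        simp only [aIsHeadLoop, List.any_cons, ih]
        cases hA : PySem.Str.isIn n (PySem.Str.lower line) <;>
          cases hC : decide (PySem.Str.len line < 50) <;> simp_all
  simpa [bIsHeading] using h cvSections

-- A's loop restated on the normalized (stripped, non-empty) lines
def core (sections : PySem.Dict String String) (cur : Option String)
    (content : List String) : List String → PySem.Dict String String
  | [] =>
      match cur with
      | some c => sections.insert c (PySem.Str.join "\n" content)
      | none => sections
  | l :: rest =>
      if bIsHeading l then
        match cur with
        | some c => core (sections.insert c (PySem.Str.join "\n" content)) (some l) [] rest
        | none => core sections (some l) [] rest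
      else
        match cur with
        | some _ => core sections cur (content ++ [l]) rest
        | none => core sections cur content rest

theorem aLoop_eq_core (raws : List String) :
    ∀ (sections : PySem.Dict String String) (cur : Option String) (content : List String),
      aLoop sections cur content raws =
        core sections cur content ((raws.map PySem.Str.strip).filter (fun s => !(s == ""))) := by
  induction raws with
  | nil => intro s c t; simp [aLoop, core]
  | cons raw rest ih =>
      intro s c t
      simp only [aLoop, List.map_cons, List.filter_cons]
      by_cases he : PySem.Str.strip raw = ""
      · simp [he, ih]
      · have hne : (!(PySem.Str.strip raw == "")) = true := by simp [he]
        simp only [he, if_false, hne, if_true, head_eq]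
        by_cases hh : bIsHeading (PySem.Str.strip raw) = true
        · cases c <;> simp [hh, core, ih]
        · cases c <;> simp [hh, core, ih]

theorem core_some_eq (ls : List String) :
    ∀ (sections : PySem.Dict String String) (c : String) (content : List String),
      core sections (some c) content ls =
        bBuild (sections.insert c (PySem.Str.join "\n" (content ++ (bSpan ls).1))) (bSpan ls).2 := by
  induction ls with
  | nil => intro s c t; simp [core, bSpan, bBuild]
  | cons l rest ih =>
      intro s c t
      simp only [core, bSpan]
      by_cases hh : bIsHeading l = true
      · simp only [hh, if_true]
        rw [ih]
        conv_rhs => rw [bBuild]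
        simp
      · simp only [hh, Bool.false_eq_true, if_false]
        rw [ih, List.append_assoc]
        simp

theorem core_none_eq (ls : List String) :
    ∀ (sections : PySem.Dict String String) (content : List String),
      core sections none content ls = bBuild sections (bDrop ls) := by
  induction ls with
  | nil => intro s t; simp [core, bDrop, bBuild]
  | cons l rest ih =>
      intro s t
      simp only [core, bDrop]
      by_cases hh : bIsHeading l = true
      · simp only [hh, if_true]
        rw [core_some_eq]
        conv_rhs => rw [bBuild]
        simp
      · simp [hh, ih]

-- ===== VERDICT (by name: the statement is the Claim_ definition above) =====
theorem extract_cv_sections_py_spec : Claim_equal_extract_cv_sections_py := by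
  intro text _
  unfold Spec_extract_cv_sections_py extract_cv_sections_py extract_cv_sections_py_alt
  rw [aLoop_eq_core, core_none_eq]
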